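-- pv_equiv track=rewrite | github.com/Leputa/Leetcode | python/工人调度.py | max_ability
-- ===== SOURCE A (Python) =====
-- def max_ability(m, workers):
--     flags = [True] * len(workers)
--     sorted_list = []
--
--     for i in range(m):
--         sorted_list.append([]) # 每台机器可以被哪些工人操作
--
--     for i in range(len(workers)):
--         worker = workers[i]
--         sorted_list[worker[0]-1].append((i, worker[2]))
--         sorted_list[worker[1]-1].append((i, worker[2]))
--
--     ret = 0
--     for i in range(m):
--         if len(sorted_list[i]) != 0:
--             # sorted_list[i] = sorted(sorted_list[i], key=lambda info: info[1], reverse=True)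
--             _ability = 0
--             pos = -1
--             for worker, ability in sorted_list[i]:
--                 if flags[worker] == True and ability > _ability:
--                     _ability = ability
--                     pos = worker
--                     # flags[worker - 1] = False
--                     # ret += ability
--                     # break
--             if pos != -1:
--                 flags[pos] = False
--                 ret += _ability
--     return ret
-- ===== SOURCE B (Python) =====
-- def max_ability(m, workers):
--     buckets = [[] for _ in range(m)]
--     for i, w in enumerate(workers):
--         buckets[w[0] - 1].append((i, w[2]))
--         buckets[w[1] - 1].append((i, w[2]))
--     free = [True] * len(workers)
--     total = 0
--     for cand in buckets:
--         for worker, ability in sorted(cand, key=lambda p: (-p[1], p[0])):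
--             if ability <= 0:
--                 break
--             if free[worker]:
--                 free[worker] = False
--                 total += ability
--                 break
--     return total
-- ===== Notes on version B (the rewrite author's own statement) =====
-- stated objective: alternative
-- what changed: Per machine, instead of a manual scan tracking a running maximum ability and a pos sentinel, B sorts the machine's candidates by (-ability, worker_index) and takes the first still-free worker with positive ability, breaking early once abilities drop to 0.
import Mathlib
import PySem

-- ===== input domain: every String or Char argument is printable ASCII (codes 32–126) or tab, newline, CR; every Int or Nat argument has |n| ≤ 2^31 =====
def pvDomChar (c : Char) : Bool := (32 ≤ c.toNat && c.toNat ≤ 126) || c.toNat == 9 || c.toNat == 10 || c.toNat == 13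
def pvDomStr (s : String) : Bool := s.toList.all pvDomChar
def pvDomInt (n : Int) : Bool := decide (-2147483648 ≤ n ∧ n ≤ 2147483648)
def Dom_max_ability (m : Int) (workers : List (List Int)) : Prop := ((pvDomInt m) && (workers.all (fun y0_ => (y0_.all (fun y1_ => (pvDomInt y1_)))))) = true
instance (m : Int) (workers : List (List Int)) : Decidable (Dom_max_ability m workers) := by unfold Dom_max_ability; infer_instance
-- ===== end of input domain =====

-- B replaces A's per-machine running-max/pos scan by sorting each machine's candidates
-- by (-ability, worker) and picking the first still-free worker (objective: alternative).

-- ===== PORT A =====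

-- `bs[j].append(x)` for a Python index j; exact for -len bs ≤ j < len bs
-- (out of range Python raises IndexError — excluded by Pre_; there `modify` is a no-op).
def pyAppendAt {α : Type} (bs : List (List α)) (j : Int) (x : α) : List (List α) :=
  let n : Int := if j < 0 then j + bs.length else j
  bs.modify n.toNat (fun b => b ++ [x])

-- shared by both ports: the two `sorted_list[worker[k]-1].append((i, worker[2]))` lines,
-- which are literally identical in Source A and Source B
def addWorker (bs : List (List (Int × Int))) (iw : Int × List Int) : List (List (Int × Int)) :=
  pyAppendAt (pyAppendAt bs (PySem.List.pyGetD iw.2 0 0 - 1) (iw.1, PySem.List.pyGetD iw.2 2 0))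
    (PySem.List.pyGetD iw.2 1 0 - 1) (iw.1, PySem.List.pyGetD iw.2 2 0)

-- A's per-machine body: scan candidates tracking (_ability, pos), then commit.
-- `flags[pos] = False` is ported as `.set pos.toNat`, exact since the guarded pos is ≥ 0.
def stepA (s : List Bool × Int) (c : List (Int × Int)) : List Bool × Int :=
  if c.length ≠ 0 then
    let r := c.foldl (fun (t : Int × Int) (p : Int × Int) =>
      if PySem.List.pyGetD s.1 p.1 false && decide (t.1 < p.2) then (p.2, p.1) else t) (0, -1)
    if r.2 ≠ -1 then (s.1.set r.2.toNat false, s.2 + r.1) else s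
  else s

def max_ability (m : Int) (workers : List (List Int)) : Int :=
  let init : List (List (Int × Int)) :=
    (PySem.List.pyRange 0 m).foldl (fun acc _ => acc ++ [[]]) []
  let buckets := (PySem.List.pyRange 0 (PySem.List.len workers)).foldl
    (fun bs i => addWorker bs (i, PySem.List.pyGetD workers i [])) init
  let flags := List.replicate workers.length true
  ((PySem.List.pyRange 0 m).foldl
    (fun s i => stepA s (PySem.List.pyGetD buckets i [])) (flags, 0)).2

-- ===== PORT B =====

-- B's inner loop: walk the sorted candidates, break at the first non-positive ability,
-- take the first still-free worker.  Worker indices are ≥ 0, so `.set w.toNat` is exact.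
def pickLoop (flags : List Bool) (total : Int) : List (Int × Int) → List Bool × Int
  | [] => (flags, total)
  | (w, a) :: rest =>
    if a ≤ 0 then (flags, total)
    else if PySem.List.pyGetD flags w false then (flags.set w.toNat false, total + a)
    else pickLoop flags total rest

def stepB (s : List Bool × Int) (c : List (Int × Int)) : List Bool × Int :=
  pickLoop s.1 s.2 (PySem.List.sorted2 c (fun p => -p.2) (fun p => p.1))

def max_ability_alt (m : Int) (workers : List (List Int)) : Int :=
  let buckets := (PySem.List.enumerate workers).foldl addWorker
    ((PySem.List.pyRange 0 m).map (fun _ => []))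
  let flags := List.replicate workers.length true
  (buckets.foldl stepB (flags, 0)).2

-- ===== PRECONDITION & SPEC =====
-- Pre_ excludes exactly the inputs where Python A raises IndexError: a worker entry
-- shorter than 3 (on worker[2]) or a machine index worker[0]-1 / worker[1]-1 outside
-- the valid Python index range of the m-element machine list (on the append).
def Pre_max_ability (m : Int) (workers : List (List Int)) : Prop :=
  ∀ w ∈ workers, 3 ≤ w.length ∧
    (-(m.toNat : Int) ≤ PySem.List.pyGetD w 0 0 - 1 ∧ PySem.List.pyGetD w 0 0 - 1 < (m.toNat : Int)) ∧
    (-(m.toNat : Int) ≤ PySem.List.pyGetD w 1 0 - 1 ∧ PySem.List.pyGetD w 1 0 - 1 < (m.toNat : Int))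
instance (m : Int) (workers : List (List Int)) : Decidable (Pre_max_ability m workers) := by
  unfold Pre_max_ability; infer_instance

def pvWitness_max_ability : Int × List (List Int) := (2, [[1, 2, 5], [1, 1, 3]])

def Spec_max_ability (m : Int) (workers : List (List Int)) (out : Int) : Prop := out = max_ability_alt m workers
instance (m : Int) (workers : List (List Int)) (out : Int) : Decidable (Spec_max_ability m workers out) := by unfold Spec_max_ability; infer_instance

-- ===== CLAIM (what is proved, stated in full; the proofs are below) =====
def Claim_equal_max_ability : Prop := ∀ (m : Int) (workers : List (List Int)), Dom_max_ability m workers → Pre_max_ability m workers → Spec_max_ability m workers (max_ability m workers)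

-- ===== LEMMAS AND PROOFS =====

-- the weak order B sorts by: p before q iff p has larger ability, or equal ability and p.1 ≤ q.1
def BKey (p q : Int × Int) : Prop := q.2 < p.2 ∨ (p.2 = q.2 ∧ p.1 ≤ q.1)

lemma bkey_trans {p q r : Int × Int} (h1 : BKey p q) (h2 : BKey q r) : BKey p r := by
  unfold BKey at *; omega

-- the boolean comparator sorted2 uses for the keys (fun p => -p.2), (fun p => p.1)
def BLt (p q : Int × Int) : Bool :=
  decide ((-p.2 : Int) < -q.2) || (!decide ((-q.2 : Int) < -p.2) && decide (p.1 < q.1))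

lemma bkey_of_blt {p q : Int × Int} (h : BLt p q = true) : BKey p q := by
  unfold BLt at h; unfold BKey; simp at h; omega

lemma bkey_of_not_blt {p q : Int × Int} (h : BLt p q = false) : BKey q p := by
  unfold BLt at h; unfold BKey; simp at h; omega

lemma sorted2_eq_foldl (c : List (Int × Int)) :
    PySem.List.sorted2 c (fun p => -p.2) (fun p => p.1) =
      c.foldl (fun acc x => PySem.List.insertBy BLt x acc) [] := by
  show List.foldl (fun acc x => PySem.List.insertBy (if (false = true) then _ else fun a b => BLt a b) x acc) [] c = _
  rw [if_neg (by decide)]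

lemma mem_insertBy' {x y : Int × Int} {l : List (Int × Int)}
    (h : y ∈ PySem.List.insertBy BLt x l) : y = x ∨ y ∈ l := by
  induction l with
  | nil => simp [PySem.List.insertBy] at h; simp [h]
  | cons z zs ih =>
    simp only [PySem.List.insertBy] at h
    split at h
    · rcases List.mem_cons.1 h with rfl | h
      · left; rfl
      · right; exact h
    · rcases List.mem_cons.1 h with rfl | h
      · right; simp
      · rcases ih h with h | h
        · left; exact h
        · right; simp [h]

lemma insertBy_pairwise (x : Int × Int) (l : List (Int × Int)) (h : l.Pairwise BKey) :
    (PySem.List.insertBy BLt x l).Pairwise BKey := by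
  induction l with
  | nil => simp [PySem.List.insertBy]
  | cons z zs ih =>
    rcases List.pairwise_cons.1 h with ⟨hz, hzs⟩
    simp only [PySem.List.insertBy]
    split
    · rename_i hb
      refine List.pairwise_cons.2 ⟨?_, h⟩
      intro y hy
      rcases List.mem_cons.1 hy with rfl | hy
      · exact bkey_of_blt hb
      · exact bkey_trans (bkey_of_blt hb) (hz y hy)
    · rename_i hb
      refine List.pairwise_cons.2 ⟨?_, ih hzs⟩
      intro y hy
      rcases mem_insertBy' hy with rfl | hy
      · exact bkey_of_not_blt (Bool.not_eq_true _ ▸ (by simpa using hb))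
      · exact hz y hy

lemma sorted2_pairwise_bkey (c : List (Int × Int)) :
    (PySem.List.sorted2 c (fun p => -p.2) (fun p => p.1)).Pairwise BKey := by
  rw [sorted2_eq_foldl]
  suffices h : ∀ acc : List (Int × Int), acc.Pairwise BKey →
      (c.foldl (fun acc x => PySem.List.insertBy BLt x acc) acc).Pairwise BKey by
    exact h [] (by simp)
  induction c with
  | nil => intro acc h; simpa using h
  | cons x xs ih => intro acc h; exact ih _ (insertBy_pairwise x acc h)

-- B's inner loop is "find the first free positive-ability candidate" on a BKey-sorted list
lemma pickLoop_eq_find (flags : List Bool) (total : Int) (ys : List (Int × Int))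
    (h : ys.Pairwise BKey) :
    pickLoop flags total ys =
      match ys.find? (fun p => PySem.List.pyGetD flags p.1 false && decide (0 < p.2)) with
      | none => (flags, total)
      | some p => (flags.set p.1.toNat false, total + p.2) := by
  induction ys with
  | nil => simp [pickLoop]
  | cons y rest ih =>
    obtain ⟨w, a⟩ := y
    rcases List.pairwise_cons.1 h with ⟨hy, hrest⟩
    by_cases ha : a ≤ 0
    · have hnone : ((w, a) :: rest).find?
          (fun p => PySem.List.pyGetD flags p.1 false && decide (0 < p.2)) = none := by
        apply List.find?_eq_none.2
        intro p hp
        rcases List.mem_cons.1 hp with rfl | hp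
        · simp; omega
        · have := hy p hp
          unfold BKey at this
          simp; intro _; omega
      rw [hnone]; simp [pickLoop, ha]
    · rw [not_le] at ha
      by_cases hf : PySem.List.pyGetD flags w false = true
      · have : ((w, a) :: rest).find?
            (fun p => PySem.List.pyGetD flags p.1 false && decide (0 < p.2)) = some (w, a) := by
          simp [hf, ha]
        rw [this]; simp [pickLoop, hf, not_le.2 ha]
      · have hcond : (PySem.List.pyGetD flags (w, a).1 false && decide (0 < (w, a).2)) = false := by
          simp [hf]
        rw [List.find?_cons_of_neg (by simpa using hcond)]
        simp only [pickLoop]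
        rw [if_neg (not_le.2 ha), if_neg (by simpa using hf)]
        exact ih hrest

-- on a BKey-sorted list, find? returns a BKey-least element among those satisfying pred
lemma find?_bkey_min {pred : Int × Int → Bool} {ys : List (Int × Int)} {p : Int × Int}
    (h : ys.Pairwise BKey) (hf : ys.find? pred = some p) :
    ∀ e ∈ ys, pred e = true → BKey p e := by
  induction ys with
  | nil => simp at hf
  | cons y rest ih =>
    rcases List.pairwise_cons.1 h with ⟨hy, hrest⟩
    by_cases hp : pred y = true
    · rw [List.find?_cons_of_pos hp] at hf
      obtain rfl : y = p := by simpa using hf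
      intro e he _
      rcases List.mem_cons.1 he with rfl | he
      · unfold BKey; omega
      · exact hy e he
    · rw [List.find?_cons_of_neg (by simpa using hp)] at hf
      intro e he hpe
      rcases List.mem_cons.1 he with rfl | he
      · exact absurd hpe hp
      · exact ih hrest hf e he hpe

-- characterization of A's running-max scan on a fst-monotone candidate list:
-- either nothing beats the accumulator, or the result is the first-scanned element
-- carrying the maximal ability among the free candidates
lemma foldA_char (flags : List Bool) (c : List (Int × Int)) (t0 : Int × Int)
    (hc : c.Pairwise (fun p q => p.1 < q.1 ∨ p = q)) :
    (c.foldl (fun (t : Int × Int) (p : Int × Int) =>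
        if PySem.List.pyGetD flags p.1 false && decide (t.1 < p.2) then (p.2, p.1) else t) t0 = t0 ∧
      ∀ q ∈ c, PySem.List.pyGetD flags q.1 false = true → q.2 ≤ t0.1)
    ∨ (∃ e ∈ c, c.foldl (fun (t : Int × Int) (p : Int × Int) =>
        if PySem.List.pyGetD flags p.1 false && decide (t.1 < p.2) then (p.2, p.1) else t) t0 = (e.2, e.1) ∧
        PySem.List.pyGetD flags e.1 false = true ∧ t0.1 < e.2 ∧
        ∀ q ∈ c, PySem.List.pyGetD flags q.1 false = true →
          (q.2 < e.2 ∨ (q.2 = e.2 ∧ (e.1 < q.1 ∨ e = q)))) := by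
  induction c generalizing t0 with
  | nil => left; simp
  | cons p c' ih =>
    rcases List.pairwise_cons.1 hc with ⟨hp, hc'⟩
    by_cases hcond : (PySem.List.pyGetD flags p.1 false && decide (t0.1 < p.2)) = true
    · simp only [List.foldl_cons]
      rw [if_pos hcond]
      have hboth : PySem.List.pyGetD flags p.1 false = true ∧ t0.1 < p.2 := by simpa using hcond
      obtain ⟨hfree, hlt⟩ := hboth
      rcases ih (p.2, p.1) hc' with ⟨heq, hmax⟩ | ⟨e, he, heq, hef, helt, hemax⟩
      · right
        refine ⟨p, by simp, heq, hfree, hlt, ?_⟩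
        intro q hq hqf
        rcases List.mem_cons.1 hq with rfl | hq
        · right; exact ⟨rfl, Or.inr rfl⟩
        · have hq2 := hmax q hq hqf
          simp only at hq2
          rcases eq_or_lt_of_le hq2 with hq2 | hq2
          · right
            refine ⟨hq2, ?_⟩
            rcases hp q hq with h | h
            · left; exact h
            · right; exact h
          · left; exact hq2
      · right
        refine ⟨e, by simp [he], heq, hef, lt_trans hlt helt, ?_⟩
        intro q hq hqf
        rcases List.mem_cons.1 hq with rfl | hq
        · left; simpa using helt
        · exact hemax q hq hqf
    · simp only [List.foldl_cons]
      rw [if_neg hcond]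
      have hple : PySem.List.pyGetD flags p.1 false = true → p.2 ≤ t0.1 := by
        intro hf
        by_contra hlt
        exact hcond (by simp [hf]; omega)
      rcases ih t0 hc' with ⟨heq, hmax⟩ | ⟨e, he, heq, hef, helt, hemax⟩
      · left
        refine ⟨heq, ?_⟩
        intro q hq hqf
        rcases List.mem_cons.1 hq with rfl | hq
        · exact hple hqf
        · exact hmax q hq hqf
      · right
        refine ⟨e, by simp [he], heq, hef, helt, ?_⟩
        intro q hq hqf
        rcases List.mem_cons.1 hq with rfl | hq
        · left; exact lt_of_le_of_lt (hple hqf) helt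
        · exact hemax q hq hqf

-- the per-machine steps agree on fst-monotone candidate lists with non-negative workers
lemma step_eq (s : List Bool × Int) (c : List (Int × Int))
    (hc : c.Pairwise (fun p q => p.1 < q.1 ∨ p = q)) (hnn : ∀ p ∈ c, 0 ≤ p.1) :
    stepA s c = stepB s c := by
  have hys := sorted2_pairwise_bkey c
  have hperm : (PySem.List.sorted2 c (fun p => -p.2) (fun p => p.1)).Perm c :=
    PySem.List.sorted2_perm c _ _ false
  unfold stepB
  rw [pickLoop_eq_find _ _ _ hys]
  rcases foldA_char s.1 c (0, -1) hc with ⟨heq, hmax⟩ | ⟨e, he, heq, hef, helt, hemax⟩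
  · have hnone : (PySem.List.sorted2 c (fun p => -p.2) (fun p => p.1)).find?
        (fun p => PySem.List.pyGetD s.1 p.1 false && decide (0 < p.2)) = none := by
      apply List.find?_eq_none.2
      intro p hp
      have hpc : p ∈ c := hperm.subset hp
      simp only [Bool.and_eq_true, decide_eq_true_eq, not_and]
      intro hfree
      have := hmax p hpc hfree
      simp at this
      omega
    rw [hnone]
    unfold stepA
    split
    · rw [heq]; simp
    · rfl
  · have he0 : 0 ≤ e.1 := hnn e he
    have hpred : (PySem.List.pyGetD s.1 e.1 false && decide (0 < e.2)) = true := by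
      simp [hef]
      simpa using helt
    have heys : e ∈ PySem.List.sorted2 c (fun p => -p.2) (fun p => p.1) :=
      (hperm.mem_iff).2 he
    cases hfind : (PySem.List.sorted2 c (fun p => -p.2) (fun p => p.1)).find?
        (fun p => PySem.List.pyGetD s.1 p.1 false && decide (0 < p.2)) with
    | none =>
      exact absurd hpred (by simpa using List.find?_eq_none.1 hfind e heys)
    | some p =>
      have hpmem : p ∈ c := hperm.subset (List.mem_of_find?_eq_some hfind)
      have hppred := List.find?_some hfind
      have hpfree : PySem.List.pyGetD s.1 p.1 false = true := (Bool.and_eq_true _ _ ▸ hppred).1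
      have hmin : BKey p e := find?_bkey_min hys hfind e heys hpred
      have hpe : p = e := by
        rcases hemax p hpmem hpfree with h1 | ⟨h1, h2 | h2⟩
        · exfalso; unfold BKey at hmin; omega
        · exfalso; unfold BKey at hmin; omega
        · exact h2.symm
      subst hpe
      unfold stepA
      rw [if_pos (by intro h; rw [List.length_eq_zero_iff] at h; subst h; simp at he)]
      simp only [heq]
      rw [if_pos (by simp; omega)]

-- bucket-construction invariant: candidates are fst-strictly-increasing (up to identical
-- duplicate entries) with worker indices in [0, k)
def GoodB (k : Int) (b : List (Int × Int)) : Prop :=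
  b.Pairwise (fun p q => p.1 < q.1 ∨ p = q) ∧ ∀ p ∈ b, 0 ≤ p.1 ∧ p.1 < k

lemma mem_modify {α : Type} (f : α → α) (l : List α) (n : Nat) (b : α)
    (h : b ∈ l.modify n f) : b ∈ l ∨ ∃ c ∈ l, b = f c := by
  induction l generalizing n with
  | nil => simp [List.modify_nil] at h
  | cons z zs ih =>
    rw [List.modify_cons] at h
    split at h
    · rcases List.mem_cons.1 h with rfl | h
      · right; exact ⟨z, by simp⟩
      · left; simp [h]
    · rcases List.mem_cons.1 h with rfl | h
      · left; simp
      · rcases ih _ h with h | ⟨c, hc, rfl⟩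
        · left; simp [h]
        · right; exact ⟨c, by simp [hc]⟩

lemma mem_pyAppendAt {α : Type} {bs : List (List α)} {j : Int} {x : α} {b : List α}
    (h : b ∈ pyAppendAt bs j x) : b ∈ bs ∨ ∃ c ∈ bs, b = c ++ [x] :=
  mem_modify _ bs _ b h

-- within one enumerate step: entries have fst < i, or are exactly the new entry (i, a)
def GoodB' (i a : Int) (b : List (Int × Int)) : Prop :=
  b.Pairwise (fun p q => p.1 < q.1 ∨ p = q) ∧ ∀ p ∈ b, 0 ≤ p.1 ∧ (p.1 < i ∨ p = (i, a))

lemma goodB'_append {i a : Int} {b : List (Int × Int)} (hi : 0 ≤ i) (h : GoodB' i a b) :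
    GoodB' i a (b ++ [(i, a)]) := by
  obtain ⟨hpw, hmem⟩ := h
  constructor
  · rw [List.pairwise_append]
    refine ⟨hpw, by simp, ?_⟩
    intro p hp q hq
    simp at hq
    subst hq
    rcases (hmem p hp).2 with h | h
    · left; exact h
    · right; exact h
  · intro p hp
    rcases List.mem_append.1 hp with hp | hp
    · exact hmem p hp
    · simp at hp; subst hp; exact ⟨hi, Or.inr rfl⟩

lemma goodB'_appendAt {i a j : Int} {bs : List (List (Int × Int))} (hi : 0 ≤ i)
    (h : ∀ b ∈ bs, GoodB' i a b) :
    ∀ b ∈ pyAppendAt bs j (i, a), GoodB' i a b := by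
  intro b hb
  rcases mem_pyAppendAt hb with hb | ⟨c, hc, rfl⟩
  · exact h b hb
  · exact goodB'_append hi (h c hc)

lemma goodB_of_goodB' {i a k : Int} {b : List (Int × Int)} (hik : i < k)
    (h : GoodB' i a b) : GoodB k b := by
  obtain ⟨hpw, hmem⟩ := h
  refine ⟨hpw, ?_⟩
  intro p hp
  rcases hmem p hp with ⟨h0, h | h⟩
  · exact ⟨h0, by omega⟩
  · subst h; exact ⟨h0, by simpa using hik⟩

lemma goodB'_of_goodB {i a : Int} {b : List (Int × Int)} (h : GoodB i b) : GoodB' i a b := by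
  obtain ⟨hpw, hmem⟩ := h
  exact ⟨hpw, fun p hp => ⟨(hmem p hp).1, Or.inl (hmem p hp).2⟩⟩

lemma build_inv (ws : List (List Int)) (s : Int) (bs : List (List (Int × Int)))
    (hs : 0 ≤ s) (h : ∀ b ∈ bs, GoodB s b) :
    ∀ b ∈ (PySem.List.enumerate ws s).foldl addWorker bs, GoodB (s + ws.length) b := by
  induction ws generalizing s bs with
  | nil => simpa [PySem.List.enumerate_nil] using h
  | cons w ws ih =>
    rw [PySem.List.enumerate_cons, List.foldl_cons]
    intro b hb
    have hstep : ∀ b ∈ addWorker bs (s, w), GoodB (s + 1) b := by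
      intro b hb
      refine goodB_of_goodB' (i := s) (a := PySem.List.pyGetD w 2 0) (by omega) ?_
      unfold addWorker at hb
      exact goodB'_appendAt hs (goodB'_appendAt hs (fun c hc => goodB'_of_goodB (h c hc))) b hb
    have := ih (s + 1) (addWorker bs (s, w)) (by omega) hstep b hb
    simpa [add_assoc, add_comm, add_left_comm] using this

lemma length_pyAppendAt {α : Type} (bs : List (List α)) (j : Int) (x : α) :
    (pyAppendAt bs j x).length = bs.length := by
  simp [pyAppendAt]

lemma length_buckets (ws : List (List Int)) (s : Int) (bs : List (List (Int × Int))) :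
    ((PySem.List.enumerate ws s).foldl addWorker bs).length = bs.length := by
  induction ws generalizing s bs with
  | nil => simp [PySem.List.enumerate_nil]
  | cons w ws ih =>
    rw [PySem.List.enumerate_cons, List.foldl_cons, ih]
    simp [addWorker, length_pyAppendAt]

-- the two ports build the same machine→candidates table
lemma ports_buckets_eq (m : Int) (workers : List (List Int)) :
    (PySem.List.pyRange 0 (PySem.List.len workers)).foldl
      (fun bs i => addWorker bs (i, PySem.List.pyGetD workers i []))
      ((PySem.List.pyRange 0 m).foldl (fun acc _ => acc ++ [[]]) []) =
    (PySem.List.enumerate workers).foldl addWorker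
      ((PySem.List.pyRange 0 m).map (fun _ => [])) := by
  rw [PySem.List.enumerate_eq_map_pyRange workers [], List.foldl_map]
  rw [PySem.List.foldl_append_singleton_eq_map (f := fun _ => ([] : List (Int × Int)))]
  simp

lemma main_eq (m : Int) (workers : List (List Int)) :
    max_ability m workers = max_ability_alt m workers := by
  unfold max_ability max_ability_alt
  dsimp only
  rw [ports_buckets_eq]
  set bckts := (PySem.List.enumerate workers).foldl addWorker
      ((PySem.List.pyRange 0 m).map (fun _ => [])) with hbck
  have hgood : ∀ b ∈ bckts, GoodB (0 + workers.length) b := by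
    apply build_inv workers 0 _ (le_refl 0)
    intro b hb
    rcases List.mem_map.1 hb with ⟨_, _, rfl⟩
    exact ⟨by simp, by simp⟩
  rcases le_or_gt m 0 with hm | hm
  · have h1 : PySem.List.pyRange 0 m = [] := PySem.List.pyRange_one_eq_nil hm
    have h2 : bckts = [] := by
      rw [← List.length_eq_zero_iff, hbck, length_buckets]
      simp [h1]
    rw [h1, h2]
    simp
  · have hlen : (PySem.List.len bckts) = m := by
      rw [hbck]
      show ((_ : List _).length : Int) = m
      rw [length_buckets]
      simp [PySem.List.length_pyRange_one]
      omega
    have hrw : PySem.List.pyRange 0 m = PySem.List.pyRange 0 (PySem.List.len bckts) := by rw [hlen]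
    rw [hrw, PySem.List.foldl_pyRange_zero_pyGetD bckts [] stepA]
    congr 1
    apply PySem.List.foldl_congr_mem
    intro acc b hb
    obtain ⟨hpw, hmem⟩ := hgood b hb
    exact step_eq acc b hpw (fun p hp => (hmem p hp).1)

-- ===== VERDICT (by name: the statement is the Claim_ definition above) =====
theorem max_ability_spec : Claim_equal_max_ability := by
  intro m workers _ _
  unfold Spec_max_ability
  exact main_eq m workers
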